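-- pv_equiv track=rewrite | github.com/neep305/adobe-code-cli | src/adobe_experience/agent/planner.py | _fallback_entity_order
-- ===== SOURCE A (Python) =====
-- from typing import Any, Dict, List, Optional
--
-- def _fallback_entity_order(entities: List[str]) -> List[str]:
--     """Return deterministic ingestion order when AI analysis is unavailable."""
--     profiles: List[str] = []
--     lookups: List[str] = []
--     events: List[str] = []
--     others: List[str] = []
--
--     for entity in entities:
--         lowered = entity.lower()
--         if any(token in lowered for token in ["customer", "profile", "account", "user"]):
--             profiles.append(entity)
--         elif any(token in lowered for token in ["product", "catalog", "category", "sku"]):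
--             lookups.append(entity)
--         elif any(token in lowered for token in ["order", "event", "transaction", "click", "purchase"]):
--             events.append(entity)
--         else:
--             others.append(entity)
--
--     return sorted(profiles) + sorted(lookups) + sorted(others) + sorted(events)
-- ===== SOURCE B (Python) =====
-- from typing import List
--
-- def _rank(entity: str) -> int:
--     lowered = entity.lower()
--     if any(t in lowered for t in ["customer", "profile", "account", "user"]):
--         return 0
--     if any(t in lowered for t in ["product", "catalog", "category", "sku"]):
--         return 1
--     if any(t in lowered for t in ["order", "event", "transaction", "click", "purchase"]):
--         return 3
--     return 2
--
-- def _fallback_entity_order(entities: List[str]) -> List[str]: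
--     ordered = sorted(entities)
--     return [e for bucket in (0, 1, 2, 3) for e in ordered if _rank(e) == bucket]
-- ===== Notes on version B (the rewrite author's own statement) =====
-- stated objective: simpler
-- what changed: Replaces A's four accumulated bucket lists each sorted separately by a rank() helper, one sort of the whole input, and emitting the four rank buckets as filters of that single sorted list.
import Mathlib
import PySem

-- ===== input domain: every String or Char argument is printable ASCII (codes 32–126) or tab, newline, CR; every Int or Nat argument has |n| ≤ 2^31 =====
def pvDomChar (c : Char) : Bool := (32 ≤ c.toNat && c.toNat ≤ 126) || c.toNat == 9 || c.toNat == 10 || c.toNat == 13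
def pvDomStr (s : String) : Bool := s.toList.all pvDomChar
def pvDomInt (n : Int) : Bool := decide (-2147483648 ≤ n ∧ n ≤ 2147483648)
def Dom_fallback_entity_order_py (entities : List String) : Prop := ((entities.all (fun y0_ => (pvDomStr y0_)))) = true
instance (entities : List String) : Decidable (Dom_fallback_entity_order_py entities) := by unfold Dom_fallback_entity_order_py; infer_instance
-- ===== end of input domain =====

-- B replaces A's four accumulated buckets + four sorts by one sort of the whole list
-- followed by emitting the rank-0,1,2,3 buckets as filters of that sorted list (objective: simpler).

-- ===== PORT A =====
-- the four keyword lists of A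
def pvProfileToks : List String := ["customer", "profile", "account", "user"]
def pvLookupToks : List String := ["product", "catalog", "category", "sku"]
def pvEventToks : List String := ["order", "event", "transaction", "click", "purchase"]

-- A's loop: state (profiles, lookups, events, others), branches in A's order
def pvA_loop (xs : List String)
    (st : List String × List String × List String × List String) :
    List String × List String × List String × List String :=
  xs.foldl (fun st entity =>
    let lowered := PySem.Str.lower entity
    if pvProfileToks.any (fun t => PySem.Str.isIn t lowered) then
      (st.1 ++ [entity], st.2.1, st.2.2.1, st.2.2.2)
    else if pvLookupToks.any (fun t => PySem.Str.isIn t lowered) then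
      (st.1, st.2.1 ++ [entity], st.2.2.1, st.2.2.2)
    else if pvEventToks.any (fun t => PySem.Str.isIn t lowered) then
      (st.1, st.2.1, st.2.2.1 ++ [entity], st.2.2.2)
    else
      (st.1, st.2.1, st.2.2.1, st.2.2.2 ++ [entity])) st

def fallback_entity_order_py (entities : List String) : List String :=
  let st := pvA_loop entities ([], [], [], [])
  PySem.List.sorted st.1 (fun x => x) false ++
  PySem.List.sorted st.2.1 (fun x => x) false ++
  PySem.List.sorted st.2.2.2 (fun x => x) false ++
  PySem.List.sorted st.2.2.1 (fun x => x) false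

-- ===== PORT B =====
def pvRank (entity : String) : Int :=
  let lowered := PySem.Str.lower entity
  if pvProfileToks.any (fun t => PySem.Str.isIn t lowered) then 0
  else if pvLookupToks.any (fun t => PySem.Str.isIn t lowered) then 1
  else if pvEventToks.any (fun t => PySem.Str.isIn t lowered) then 3
  else 2

def fallback_entity_order_py_alt (entities : List String) : List String :=
  let ordered := PySem.List.sorted entities (fun x => x) false
  ([0, 1, 2, 3] : List Int).flatMap (fun bucket => ordered.filter (fun e => pvRank e == bucket))

-- ===== PRECONDITION & SPEC =====
def Spec_fallback_entity_order_py (entities : List String) (out : List String) : Prop := out = fallback_entity_order_py_alt entities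
instance (entities : List String) (out : List String) : Decidable (Spec_fallback_entity_order_py entities out) := by unfold Spec_fallback_entity_order_py; infer_instance

-- ===== CLAIM (what is proved, stated in full; the proofs are below) =====
def Claim_equal_fallback_entity_order_py : Prop := ∀ (entities : List String), Dom_fallback_entity_order_py entities → Spec_fallback_entity_order_py entities (fallback_entity_order_py entities)

-- ===== LEMMAS AND PROOFS =====

-- A's loop appends, to each bucket, exactly the entities of the corresponding rank, in order
theorem pvA_loop_eq_filters (xs : List String)
    (p l ev o : List String) :
    pvA_loop xs (p, l, ev, o) =
      (p ++ xs.filter (fun e => pvRank e == 0),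
       l ++ xs.filter (fun e => pvRank e == 1),
       ev ++ xs.filter (fun e => pvRank e == 3),
       o ++ xs.filter (fun e => pvRank e == 2)) := by
  induction xs generalizing p l ev o with
  | nil => simp [pvA_loop]
  | cons x xs ih =>
    by_cases h1 : pvProfileToks.any (fun t => PySem.Str.isIn t (PySem.Str.lower x)) = true
    · have hr : pvRank x = 0 := by unfold pvRank; rw [if_pos h1]
      simp only [pvA_loop, List.foldl_cons, h1, if_true] at *
      rw [ih]
      simp [hr, List.append_assoc]
    · by_cases h2 : pvLookupToks.any (fun t => PySem.Str.isIn t (PySem.Str.lower x)) = true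
      · have hr : pvRank x = 1 := by unfold pvRank; rw [if_neg h1, if_pos h2]
        simp only [pvA_loop, List.foldl_cons, h1, h2, if_true] at *
        rw [ih]
        simp [hr, List.append_assoc]
      · by_cases h3 : pvEventToks.any (fun t => PySem.Str.isIn t (PySem.Str.lower x)) = true
        · have hr : pvRank x = 3 := by unfold pvRank; rw [if_neg h1, if_neg h2, if_pos h3]
          simp only [pvA_loop, List.foldl_cons, h1, h2, h3, if_true] at *
          rw [ih]
          simp [hr, List.append_assoc]
        · have hr : pvRank x = 2 := by unfold pvRank; rw [if_neg h1, if_neg h2, if_neg h3]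
          simp only [pvA_loop, List.foldl_cons, h1, h2, h3] at *
          rw [ih]
          simp [hr, List.append_assoc]

-- a stable identity sort commutes with filter
theorem pv_sorted_filter (xs : List String) (p : String → Bool) :
    PySem.List.sorted (xs.filter p) (fun x => x) false =
      (PySem.List.sorted xs (fun x => x) false).filter p := by
  apply PySem.List.sorted_id_eq_of_perm_of_pairwise
  · exact (PySem.List.sorted_perm xs (fun x => x) false).filter p
  · exact List.Pairwise.sublist List.filter_sublist
      (PySem.List.sorted_pairwise xs (fun x => x))

-- ===== VERDICT (by name: the statement is the Claim_ definition above) =====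
theorem fallback_entity_order_py_spec : Claim_equal_fallback_entity_order_py := by
  intro entities _
  unfold Spec_fallback_entity_order_py fallback_entity_order_py fallback_entity_order_py_alt
  rw [pvA_loop_eq_filters]
  simp only [List.nil_append, List.flatMap_cons, List.flatMap_nil, List.append_nil]
  rw [pv_sorted_filter, pv_sorted_filter, pv_sorted_filter, pv_sorted_filter]
  simp [List.append_assoc]
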